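-- pv_equiv track=rewrite | github.com/mmackay055/aoc_2023 | solutions/d2/common.py | get_minimum_hand
-- ===== SOURCE A (Python) =====
-- def get_minimum_hand(hands):
--     blue = 0
--     green = 0
--     red = 0
--
--     for h in hands:
--         b = h['blue']
--         if b > blue:
--             blue = b
--         r = h['red']
--         if r > red:
--             red = r
--         g = h['green']
--         if g > green:
--             green = g
--
--     return {'blue': blue, 'red': red, 'green': green}
-- ===== SOURCE B (Python) =====
-- def get_minimum_hand(hands):
--     zero = {'blue': 0, 'red': 0, 'green': 0}
--     if not hands:
--         return zero
--     best = _merge_max(hands)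
--     return {c: best[c] if best[c] >= 0 else 0 for c in zero}
--
--
-- def _merge_max(hs):
--     # divide and conquer: pointwise max of the two halves (max is associative)
--     if len(hs) <= 1:
--         h = hs[0]
--         return {'blue': h['blue'], 'red': h['red'], 'green': h['green']}
--     mid = len(hs) // 2
--     left = _merge_max(hs[:mid])
--     right = _merge_max(hs[mid:])
--     return {c: left[c] if left[c] >= right[c] else right[c] for c in left}
-- ===== Notes on version B (the rewrite author's own statement) =====
-- stated objective: alternative
-- what changed: Replaces A's single left-to-right scan with running accumulators by a divide-and-conquer recursion that splits the hand list in halves and merges the two partial results by pointwise max (correct because max is associative and commutative), clamping at 0 only at the top.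
import Mathlib
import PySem

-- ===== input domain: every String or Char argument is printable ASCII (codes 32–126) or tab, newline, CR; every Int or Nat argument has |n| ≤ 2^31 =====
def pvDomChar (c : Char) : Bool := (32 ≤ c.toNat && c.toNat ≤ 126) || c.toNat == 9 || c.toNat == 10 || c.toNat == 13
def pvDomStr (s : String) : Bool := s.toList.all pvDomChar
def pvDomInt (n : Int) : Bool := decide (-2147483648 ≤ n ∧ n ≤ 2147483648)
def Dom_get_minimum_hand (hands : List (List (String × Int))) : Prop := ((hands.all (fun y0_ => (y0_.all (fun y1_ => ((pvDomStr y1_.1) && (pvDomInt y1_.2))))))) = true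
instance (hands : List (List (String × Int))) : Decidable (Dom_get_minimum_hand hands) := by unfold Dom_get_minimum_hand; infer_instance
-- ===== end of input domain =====

-- B computes the per-color maxima by divide and conquer (split in halves, merge by
-- pointwise max) instead of A's single scan with running accumulators; return value
-- proved equal on Pre_.

-- ===== PORT A =====
-- h['blue'] raises KeyError when the key is missing; Pre_ excludes that, so the
-- '.getD … 0' default is never reached on admitted inputs.
def get_minimum_hand (hands : List (List (String × Int))) : List (String × Int) :=
  let s := hands.foldl
    (fun (acc : Int × Int × Int) h =>
      let b := (PySem.Dict.mk h).getD "blue" 0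
      let blue := if b > acc.1 then b else acc.1
      let r := (PySem.Dict.mk h).getD "red" 0
      let red := if r > acc.2.1 then r else acc.2.1
      let g := (PySem.Dict.mk h).getD "green" 0
      let green := if g > acc.2.2 then g else acc.2.2
      (blue, red, green))
    (0, 0, 0)
  [("blue", s.1), ("red", s.2.1), ("green", s.2.2)]

-- ===== PORT B =====
-- _merge_max: the dict lookups h[c] use '.getD … 0'; the default is unreachable under
-- Pre_ (and hs[0] on the unreachable empty call is '.getD []').
def gmhMerge (hs : List (List (String × Int))) : List (String × Int) :=
  if _hle : hs.length ≤ 1 then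
    let h := (PySem.List.pyGet? hs 0).getD []
    [("blue", (PySem.Dict.mk h).getD "blue" 0),
     ("red", (PySem.Dict.mk h).getD "red" 0),
     ("green", (PySem.Dict.mk h).getD "green" 0)]
  else
    let mid := PySem.Int.floordiv (hs.length : Int) 2
    let left := gmhMerge (PySem.List.slice hs none (some mid))
    let right := gmhMerge (PySem.List.slice hs (some mid) none)
    left.map (fun p => (p.1,
      if (PySem.Dict.mk left).getD p.1 0 ≥ (PySem.Dict.mk right).getD p.1 0
      then (PySem.Dict.mk left).getD p.1 0
      else (PySem.Dict.mk right).getD p.1 0))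
termination_by hs.length
decreasing_by
  · have h2 : PySem.Int.floordiv (hs.length : Int) 2 = ((hs.length / 2 : Nat) : Int) := by
      exact_mod_cast PySem.Int.floordiv_natCast hs.length 2
    rw [h2, PySem.List.slice_to_natCast]
    simp only [List.length_take]
    omega
  · have h2 : PySem.Int.floordiv (hs.length : Int) 2 = ((hs.length / 2 : Nat) : Int) := by
      exact_mod_cast PySem.Int.floordiv_natCast hs.length 2
    rw [h2, PySem.List.slice_from_natCast]
    simp only [List.length_drop]
    omega

def get_minimum_hand_alt (hands : List (List (String × Int))) : List (String × Int) :=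
  let zero : List (String × Int) := [("blue", 0), ("red", 0), ("green", 0)]
  if hands.isEmpty then zero
  else
    let best := gmhMerge hands
    zero.map (fun p => (p.1,
      if (PySem.Dict.mk best).getD p.1 0 ≥ 0 then (PySem.Dict.mk best).getD p.1 0 else 0))

-- ===== PRECONDITION & SPEC =====
-- Pre_ excludes exactly the inputs where some hand lacks one of the three keys: there A raises KeyError.
def Pre_get_minimum_hand (hands : List (List (String × Int))) : Prop :=
  (hands.all (fun h => h.any (fun p => p.1 == "blue") && h.any (fun p => p.1 == "red") && h.any (fun p => p.1 == "green"))) = true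
instance (hands : List (List (String × Int))) : Decidable (Pre_get_minimum_hand hands) := by unfold Pre_get_minimum_hand; infer_instance
def pvWitness_get_minimum_hand : (List (List (String × Int))) := [[("blue", 1), ("red", 2), ("green", 3)], [("green", 0), ("red", 7), ("blue", 4)]]

def Spec_get_minimum_hand (hands : List (List (String × Int))) (out : List (String × Int)) : Prop := out = get_minimum_hand_alt hands
instance (hands : List (List (String × Int))) (out : List (String × Int)) : Decidable (Spec_get_minimum_hand hands out) := by unfold Spec_get_minimum_hand; infer_instance

-- ===== CLAIM (what is proved, stated in full; the proofs are below) =====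
def Claim_equal_get_minimum_hand : Prop := ∀ (hands : List (List (String × Int))), Dom_get_minimum_hand hands → Pre_get_minimum_hand hands → Spec_get_minimum_hand hands (get_minimum_hand hands)

-- ===== LEMMAS AND PROOFS =====

-- value of color c in hand h, as both ports read it
def gmhVal (c : String) (h : List (String × Int)) : Int := (PySem.Dict.mk h).getD c 0

-- maximum of a nonempty column
def gmhM (c : String) : List (List (String × Int)) → Int
  | [] => 0
  | h :: t => (t.map (gmhVal c)).foldl max (gmhVal c h)

theorem if_ge_eq_max (a b : Int) : (if a ≥ b then a else b) = max a b := by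
  rw [max_def]; split_ifs <;> omega

theorem if_gt_eq_max (a b : Int) : (if b > a then b else a) = max a b := by
  rw [max_def]; split_ifs <;> omega

theorem foldl_max_pull (l : List Int) (a x : Int) :
    l.foldl max (max a x) = max a (l.foldl max x) := by
  induction l generalizing x with
  | nil => rfl
  | cons y t ih => simpa [max_assoc] using ih (max x y)

theorem gmhM_append (c : String) (l₁ l₂ : List (List (String × Int)))
    (h₁ : l₁ ≠ []) (h₂ : l₂ ≠ []) :
    gmhM c (l₁ ++ l₂) = max (gmhM c l₁) (gmhM c l₂) := by
  obtain ⟨x, t₁, rfl⟩ := List.exists_cons_of_ne_nil h₁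
  obtain ⟨y, t₂, rfl⟩ := List.exists_cons_of_ne_nil h₂
  simp only [gmhM, List.cons_append, List.map_append, List.map_cons,
    List.foldl_append, List.foldl_cons]
  rw [foldl_max_pull]

-- the merge recursion computes exactly the three column maxima, in key order blue, red, green
theorem gmhMerge_eq (hs : List (List (String × Int))) (hne : hs ≠ []) :
    gmhMerge hs = [("blue", gmhM "blue" hs), ("red", gmhM "red" hs), ("green", gmhM "green" hs)] := by
  fun_induction gmhMerge hs with
  | case1 hs hle =>
    obtain ⟨h, t, rfl⟩ := List.exists_cons_of_ne_nil hne
    have : t = [] := by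
      cases t with
      | nil => rfl
      | cons a b => simp at hle
    subst this
    simp only [gmhM, gmhVal, List.map_nil, List.foldl_nil]
    rfl
  | case2 hs hle mid left right ih₁ ih₂ =>
    have h2 : mid = ((hs.length / 2 : Nat) : Int) := by
      exact_mod_cast PySem.Int.floordiv_natCast hs.length 2
    have hlen : 2 ≤ hs.length := by omega
    have hL : PySem.List.slice hs none (some mid) = hs.take (hs.length / 2) := by
      rw [h2, PySem.List.slice_to_natCast]
    have hR : PySem.List.slice hs (some mid) none = hs.drop (hs.length / 2) := by
      rw [h2, PySem.List.slice_from_natCast]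
    have hLne : hs.take (hs.length / 2) ≠ [] := by
      simp only [ne_eq, ← List.length_pos_iff, List.length_take]; omega
    have hRne : hs.drop (hs.length / 2) ≠ [] := by
      simp only [ne_eq, ← List.length_pos_iff, List.length_drop]; omega
    rw [hL] at ih₁; rw [hR] at ih₂
    have e₁ := ih₁ hLne
    have e₂ := ih₂ hRne
    simp only [left, right, hL, hR, e₁, e₂]
    have hsplit : hs = hs.take (hs.length / 2) ++ hs.drop (hs.length / 2) :=
      (List.take_append_drop _ _).symm
    simp [PySem.Dict.getD, PySem.Dict.get?, if_ge_eq_max]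
    refine ⟨?_, ?_, ?_⟩ <;> (conv_rhs => rw [hsplit]) <;>
      exact (gmhM_append _ _ _ hLne hRne).symm

theorem fold_triple_max (fb fr fg : List (String × Int) → Int)
    (hands : List (List (String × Int))) (a b c : Int) :
    hands.foldl
      (fun (acc : Int × Int × Int) h => (max acc.1 (fb h), max acc.2.1 (fr h), max acc.2.2 (fg h)))
      (a, b, c)
    = ((hands.map fb).foldl max a, (hands.map fr).foldl max b, (hands.map fg).foldl max c) := by
  induction hands generalizing a b c with
  | nil => rfl
  | cons h t ih =>
    simp only [List.foldl_cons, List.map_cons]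
    exact ih _ _ _

theorem foldl_max_zero_eq (c : String) (h : List (String × Int)) (t : List (List (String × Int))) :
    ((h :: t).map (fun x => (PySem.Dict.mk x).getD c 0)).foldl max 0 = max 0 (gmhM c (h :: t)) := by
  simp only [List.map_cons, List.foldl_cons, gmhM, gmhVal]
  rw [← foldl_max_pull]
  rfl

-- ===== VERDICT (by name: the statement is the Claim_ definition above) =====
theorem get_minimum_hand_spec : Claim_equal_get_minimum_hand := by
  intro hands _ _
  unfold Spec_get_minimum_hand get_minimum_hand get_minimum_hand_alt
  simp only [if_gt_eq_max, fold_triple_max]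
  cases hands with
  | nil => rfl
  | cons h t =>
    rw [gmhMerge_eq (h :: t) (by simp)]
    simp only [foldl_max_zero_eq]
    simp [PySem.Dict.getD, PySem.Dict.get?, if_ge_eq_max, max_comm]
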